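-- pv_equiv track=rewrite | github.com/gnailuy/code_forces | acw/poj_2385_bfs.py | max_apple
-- ===== SOURCE A (Python) =====
-- def max_apple(schedule, w):
--     point = [(1, 0, 0)]  # (position, moves, apples)
--     for s in schedule:
--         new_point = []
--         for p in point:
--             new_point.append((p[0], p[1], p[2] if p[0] != s else p[2]+1))  # Don't move
--             if p[1] < w:
--                 new_point.append((1 if p[0] == 2 else 2, p[1]+1, p[2] if p[0] == s else p[2]+1))  # Move
--         point = new_point
--
--     max_apple = 0
--     for p in point:
--         if max_apple < p[2]:
--             max_apple = p[2]
--     return max_apple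
-- ===== SOURCE B (Python) =====
-- def max_apple(schedule, w):
--     # Backward DP: dp1[j]/dp2[j] = best apples obtainable from the suffix seen so far
--     # when standing at tree 1/tree 2 with j switches still allowed (j capped at the
--     # useful maximum min(suffix length, max(w, 0))).
--     W = w if w > 0 else 0
--     dp1, dp2 = [0], [0]
--     for s in reversed(schedule):
--         old_top = len(dp1) - 1
--         top = min(len(dp1), W)
--         nd1, nd2 = [], []
--         for j in range(top + 1):
--             c = j if j < old_top else old_top
--             v1 = (1 if s == 1 else 0) + dp1[c]
--             v2 = (1 if s == 2 else 0) + dp2[c]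
--             if j > 0:
--                 v1 = max(v1, (0 if s == 1 else 1) + dp2[j - 1])
--                 v2 = max(v2, (0 if s == 2 else 1) + dp1[j - 1])
--             nd1.append(v1)
--             nd2.append(v2)
--         dp1, dp2 = nd1, nd2
--     return dp1[min(W, len(schedule))]
-- ===== Notes on version B (the rewrite author's own statement) =====
-- stated objective: faster
-- what changed: A enumerates every stay/move history as an explicit list of states that can double each minute; B replaces this with a backward dynamic program over (tree, switches still allowed) tables of size min(suffix length, w)+1 per minute. Intended as faster; a timing run measured 158x at the largest size both finished (n=16) and A timed out at n=64 where B returned.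
import Mathlib
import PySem

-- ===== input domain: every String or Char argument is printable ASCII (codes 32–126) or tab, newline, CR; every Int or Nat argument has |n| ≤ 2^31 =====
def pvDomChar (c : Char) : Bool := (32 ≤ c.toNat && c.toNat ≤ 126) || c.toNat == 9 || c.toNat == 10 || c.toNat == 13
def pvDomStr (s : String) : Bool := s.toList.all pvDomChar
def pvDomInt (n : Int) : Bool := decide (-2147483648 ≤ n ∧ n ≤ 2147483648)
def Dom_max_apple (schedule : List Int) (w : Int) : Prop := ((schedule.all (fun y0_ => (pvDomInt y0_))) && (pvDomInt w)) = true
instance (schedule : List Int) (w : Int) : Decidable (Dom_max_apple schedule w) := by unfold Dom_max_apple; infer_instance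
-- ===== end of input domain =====

-- B replaces A's exponential enumeration of every stay/move history with a backward DP
-- over (tree, switches left), keyed by minute; intended as faster (probe: A timed out at n=64 where B returned).

-- ===== PORT A =====
def max_apple (schedule : List Int) (w : Int) : Int :=
  let point : List (Int × Int × Int) :=
    schedule.foldl (fun point s =>
      point.foldl (fun new_point p =>
        let new_point := new_point ++ [(p.1, p.2.1, if p.1 ≠ s then p.2.2 else p.2.2 + 1)]
        if p.2.1 < w then
          new_point ++ [((if p.1 = 2 then (1 : Int) else 2), p.2.1 + 1,
                         if p.1 = s then p.2.2 else p.2.2 + 1)]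
        else new_point) []) [(1, 0, 0)]
  point.foldl (fun m p => if m < p.2.2 then p.2.2 else m) 0

-- ===== PORT B =====
-- indices into dp1/dp2 are provably in range, so pyGetD (default 0) is exact here
def max_apple_alt (schedule : List Int) (w : Int) : Int :=
  let W : Int := if w > 0 then w else 0
  let dp : List Int × List Int :=
    schedule.reverse.foldl (fun (dp : List Int × List Int) s =>
      let old_top : Int := (dp.1.length : Int) - 1
      let top : Int := min (dp.1.length : Int) W
      (PySem.List.pyRange 0 (top + 1) 1).foldl (fun (nd : List Int × List Int) j =>
        let c : Int := if j < old_top then j else old_top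
        let v1 := (if s = 1 then (1 : Int) else 0) + PySem.List.pyGetD dp.1 c 0
        let v2 := (if s = 2 then (1 : Int) else 0) + PySem.List.pyGetD dp.2 c 0
        let v1 := if 0 < j then max v1 ((if s = 1 then (0 : Int) else 1) + PySem.List.pyGetD dp.2 (j - 1) 0) else v1
        let v2 := if 0 < j then max v2 ((if s = 2 then (0 : Int) else 1) + PySem.List.pyGetD dp.1 (j - 1) 0) else v2
        (nd.1 ++ [v1], nd.2 ++ [v2])) ([], []))
      ([0], [0])
  PySem.List.pyGetD dp.1 (min W (schedule.length : Int)) 0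

-- ===== PRECONDITION & SPEC =====
def Spec_max_apple (schedule : List Int) (w : Int) (out : Int) : Prop := out = max_apple_alt schedule w
instance (schedule : List Int) (w : Int) (out : Int) : Decidable (Spec_max_apple schedule w out) := by unfold Spec_max_apple; infer_instance

-- ===== CLAIM (what is proved, stated in full; the proofs are below) =====
def Claim_equal_max_apple : Prop := ∀ (schedule : List Int) (w : Int), Dom_max_apple schedule w → Spec_max_apple schedule w (max_apple schedule w)

-- ===== LEMMAS AND PROOFS =====

-- the common mathematical value: best apples from `rest` standing at `pos` with `k` switches allowed
def gAux : List Int → Int → Int → Int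
  | [], _, _ => 0
  | s :: rest, pos, k =>
      let stay := (if pos = s then (1 : Int) else 0) + gAux rest pos k
      if 0 < k then
        max stay ((if pos = s then (0 : Int) else 1) + gAux rest (if pos = 2 then 1 else 2) (k - 1))
      else stay

theorem gAux_nonneg (rest : List Int) (pos k : Int) : 0 ≤ gAux rest pos k := by
  induction rest generalizing pos k with
  | nil => simp [gAux]
  | cons s r ih =>
    simp only [gAux]
    have h1 := ih pos k
    have h2 := ih (if pos = 2 then 1 else 2) (k - 1)
    split_ifs <;> omega

theorem gAux_congr (rest : List Int) (pos k k' : Int)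
    (h : min (max k 0) (rest.length : Int) = min (max k' 0) (rest.length : Int)) :
    gAux rest pos k = gAux rest pos k' := by
  induction rest generalizing pos k k' with
  | nil => simp [gAux]
  | cons s r ih =>
    simp only [gAux, List.length_cons] at h ⊢
    push_cast at h
    have hk : 0 < k ↔ 0 < k' := by omega
    by_cases h0 : 0 < k
    · rw [if_pos h0, if_pos (hk.mp h0), ih pos k k' (by omega),
        ih (if pos = 2 then 1 else 2) (k - 1) (k' - 1) (by omega)]
    · rw [if_neg h0, if_neg (fun h' => h0 (hk.mpr h')), ih pos k k' (by omega)]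

-- ---------- A side ----------

def childA (w s : Int) (p : Int × Int × Int) : List (Int × Int × Int) :=
  [(p.1, p.2.1, if p.1 ≠ s then p.2.2 else p.2.2 + 1)] ++
    (if p.2.1 < w then
      [((if p.1 = 2 then (1 : Int) else 2), p.2.1 + 1, if p.1 = s then p.2.2 else p.2.2 + 1)]
    else [])

theorem stepA_eq_flatMap (w s : Int) (P : List (Int × Int × Int)) :
    P.foldl (fun new_point p =>
      let new_point := new_point ++ [(p.1, p.2.1, if p.1 ≠ s then p.2.2 else p.2.2 + 1)]
      if p.2.1 < w then
        new_point ++ [((if p.1 = 2 then (1 : Int) else 2), p.2.1 + 1,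
                       if p.1 = s then p.2.2 else p.2.2 + 1)]
      else new_point) [] = P.flatMap (childA w s) := by
  have : ∀ (acc : List (Int × Int × Int)),
      P.foldl (fun new_point p =>
        let new_point := new_point ++ [(p.1, p.2.1, if p.1 ≠ s then p.2.2 else p.2.2 + 1)]
        if p.2.1 < w then
          new_point ++ [((if p.1 = 2 then (1 : Int) else 2), p.2.1 + 1,
                         if p.1 = s then p.2.2 else p.2.2 + 1)]
        else new_point) acc = acc ++ P.flatMap (childA w s) := by
    induction P with
    | nil => simp
    | cons p t ih =>
      intro acc
      simp only [List.foldl_cons, List.flatMap_cons, childA]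
      rw [ih]
      split_ifs <;> simp
  simpa using this []

theorem lemA (w : Int) (rest : List Int) :
    ∀ (P : List (Int × Int × Int)) (a0 : Int),
      ((rest.foldl (fun point s =>
          point.foldl (fun new_point p =>
            let new_point := new_point ++ [(p.1, p.2.1, if p.1 ≠ s then p.2.2 else p.2.2 + 1)]
            if p.2.1 < w then
              new_point ++ [((if p.1 = 2 then (1 : Int) else 2), p.2.1 + 1,
                             if p.1 = s then p.2.2 else p.2.2 + 1)]
            else new_point) []) P).foldl (fun m p => if m < p.2.2 then p.2.2 else m) a0)
      = P.foldl (fun m p => max m (p.2.2 + gAux rest p.1 (w - p.2.1))) a0 := by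
  induction rest with
  | nil =>
    intro P a0
    simp only [List.foldl_nil]
    apply PySem.List.foldl_congr_mem
    intro acc p _
    simp [gAux]
    omega
  | cons s r ih =>
    intro P a0
    simp only [List.foldl_cons]
    rw [stepA_eq_flatMap w s P, ih]
    -- fold over flatMap = nested fold
    rw [List.foldl_flatMap]
    apply PySem.List.foldl_congr_mem
    intro acc p _
    show (childA w s p).foldl (fun m q => max m (q.2.2 + gAux r q.1 (w - q.2.1))) acc
        = max acc (p.2.2 + gAux (s :: r) p.1 (w - p.2.1))
    simp only [childA, gAux]
    by_cases hm : p.2.1 < w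
    · rw [if_pos hm, if_pos (by omega : (0:Int) < w - p.2.1)]
      simp only [List.foldl_cons, List.foldl_nil, List.cons_append, List.nil_append]
      have e1 : w - (p.2.1 + 1) = w - p.2.1 - 1 := by ring
      rw [e1]
      generalize gAux r p.1 (w - p.2.1) = A
      generalize gAux r (if p.1 = 2 then 1 else 2) (w - p.2.1 - 1) = B
      by_cases hp : p.1 = s <;> simp [hp] <;> omega
    · rw [if_neg hm, if_neg (by omega : ¬ (0:Int) < w - p.2.1)]
      simp only [List.append_nil, List.foldl_cons, List.foldl_nil]
      generalize gAux r p.1 (w - p.2.1) = A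
      by_cases hp : p.1 = s <;> simp [hp] <;> omega

theorem A_eq_gAux (schedule : List Int) (w : Int) :
    max_apple schedule w = gAux schedule 1 w := by
  show ((schedule.foldl _ [((1:Int), (0:Int), (0:Int))]).foldl _ 0) = _
  rw [lemA w schedule [((1:Int), (0:Int), (0:Int))] 0]
  simp only [List.foldl_cons, List.foldl_nil]
  have := gAux_nonneg schedule 1 w
  simp only [zero_add, sub_zero]
  omega

-- ---------- B side ----------

-- the DP table B maintains for a suffix `rest`
def tbl (W : Int) (rest : List Int) (pos : Int) : List Int :=
  (List.range (min rest.length W.toNat + 1)).map (fun (j : Nat) => gAux rest pos (j : Int))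

theorem length_tbl (W : Int) (rest : List Int) (pos : Int) :
    (tbl W rest pos).length = min rest.length W.toNat + 1 := by
  simp [tbl]

theorem getD_tbl (W : Int) (rest : List Int) (pos : Int) (i : Int)
    (h0 : 0 ≤ i) (h1 : i < (min rest.length W.toNat + 1 : Int)) :
    PySem.List.pyGetD (tbl W rest pos) i 0 = gAux rest pos i := by
  have hlen : i < ((tbl W rest pos).length : Int) := by rw [length_tbl]; push_cast; omega
  rw [PySem.List.pyGetD_eq_getElem _ _ h0 hlen]
  have hi : i.toNat < (List.range (min rest.length W.toNat + 1)).length := by simp; omega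
  simp only [tbl]
  rw [List.getElem_map, List.getElem_range]
  congr 1
  omega

theorem foldl_pair_append (l : List Int) (f g : Int → Int) :
    ∀ (a b : List Int),
      (l.foldl (fun (nd : List Int × List Int) j => (nd.1 ++ [f j], nd.2 ++ [g j])) (a, b))
      = (a ++ l.map f, b ++ l.map g) := by
  induction l with
  | nil => intro a b; simp
  | cons x t ih => intro a b; simp [ih]

theorem cell_eq (W : Int) (hW : 0 ≤ W) (s : Int) (rest : List Int) (pos qos : Int)
    (hpq : (if pos = 2 then (1 : Int) else 2) = qos) (k : Nat)
    (hk : (k : Int) < min ((min rest.length W.toNat + 1 : Nat) : Int) W + 1) :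
    (if 0 < (k : Int) then
        max ((if s = pos then (1 : Int) else 0) + PySem.List.pyGetD (tbl W rest pos)
              (if (k : Int) < ((min rest.length W.toNat + 1 : Nat) : Int) - 1 then (k : Int)
               else ((min rest.length W.toNat + 1 : Nat) : Int) - 1) 0)
            ((if s = pos then (0 : Int) else 1) + PySem.List.pyGetD (tbl W rest qos) ((k : Int) - 1) 0)
      else (if s = pos then (1 : Int) else 0) + PySem.List.pyGetD (tbl W rest pos)
              (if (k : Int) < ((min rest.length W.toNat + 1 : Nat) : Int) - 1 then (k : Int)
               else ((min rest.length W.toNat + 1 : Nat) : Int) - 1) 0)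
    = gAux (s :: rest) pos (k : Int) := by
  have hcast : (W.toNat : Int) = W := Int.toNat_of_nonneg hW
  have hc : (if (k : Int) < ((min rest.length W.toNat + 1 : Nat) : Int) - 1 then (k : Int)
             else ((min rest.length W.toNat + 1 : Nat) : Int) - 1)
      = min (k : Int) ((min rest.length W.toNat : Nat) : Int) := by
    split_ifs <;> push_cast at * <;> omega
  rw [hc, getD_tbl W rest pos _ (by push_cast; omega) (by push_cast at hk ⊢; omega)]
  rw [gAux_congr rest pos (min (k : Int) ((min rest.length W.toNat : Nat) : Int)) (k : Int)
      (by push_cast at hk ⊢; omega)]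
  simp only [gAux, hpq]
  by_cases h0 : 0 < (k : Int)
  · rw [if_pos h0, if_pos h0,
      getD_tbl W rest qos ((k : Int) - 1) (by omega) (by push_cast at hk ⊢; omega)]
    by_cases hs : s = pos <;> simp [hs, eq_comm]
  · rw [if_neg h0, if_neg h0]
    by_cases hs : s = pos <;> simp [hs, eq_comm]

theorem stepB_core (W : Int) (hW : 0 ≤ W) (s : Int) (rest : List Int) :
    (fun (dp : List Int × List Int) s =>
      let old_top : Int := (dp.1.length : Int) - 1
      let top : Int := min (dp.1.length : Int) W
      (PySem.List.pyRange 0 (top + 1) 1).foldl (fun (nd : List Int × List Int) j =>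
        let c : Int := if j < old_top then j else old_top
        let v1 := (if s = 1 then (1 : Int) else 0) + PySem.List.pyGetD dp.1 c 0
        let v2 := (if s = 2 then (1 : Int) else 0) + PySem.List.pyGetD dp.2 c 0
        let v1 := if 0 < j then max v1 ((if s = 1 then (0 : Int) else 1) + PySem.List.pyGetD dp.2 (j - 1) 0) else v1
        let v2 := if 0 < j then max v2 ((if s = 2 then (0 : Int) else 1) + PySem.List.pyGetD dp.1 (j - 1) 0) else v2
        (nd.1 ++ [v1], nd.2 ++ [v2])) ([], []))
      (tbl W rest 1, tbl W rest 2) s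
    = (tbl W (s :: rest) 1, tbl W (s :: rest) 2) := by
  have hcast : (W.toNat : Int) = W := Int.toNat_of_nonneg hW
  simp only []
  rw [length_tbl]
  rw [PySem.List.pyRange_one, foldl_pair_append]
  simp only [List.nil_append, List.map_map]
  have hN : (min ((min rest.length W.toNat + 1 : Nat) : Int) W + 1 - 0).toNat
      = min (rest.length + 1) W.toNat + 1 := by push_cast; omega
  rw [hN]
  have hlen : ((s :: rest : List Int)).length = rest.length + 1 := rfl
  simp only [tbl, hlen, Prod.mk.injEq]
  constructor <;>
  · apply List.map_congr_left
    intro k hk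
    rw [List.mem_range] at hk
    simp only [Function.comp_apply, zero_add]
    first
    | exact cell_eq W hW s rest 1 2 (by norm_num) k (by push_cast; omega)
    | exact cell_eq W hW s rest 2 1 (by norm_num) k (by push_cast; omega)

theorem foldB_inv (W : Int) (hW : 0 ≤ W) (u : List Int) :
    (u.foldl (fun (dp : List Int × List Int) s =>
      let old_top : Int := (dp.1.length : Int) - 1
      let top : Int := min (dp.1.length : Int) W
      (PySem.List.pyRange 0 (top + 1) 1).foldl (fun (nd : List Int × List Int) j =>
        let c : Int := if j < old_top then j else old_top
        let v1 := (if s = 1 then (1 : Int) else 0) + PySem.List.pyGetD dp.1 c 0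
        let v2 := (if s = 2 then (1 : Int) else 0) + PySem.List.pyGetD dp.2 c 0
        let v1 := if 0 < j then max v1 ((if s = 1 then (0 : Int) else 1) + PySem.List.pyGetD dp.2 (j - 1) 0) else v1
        let v2 := if 0 < j then max v2 ((if s = 2 then (0 : Int) else 1) + PySem.List.pyGetD dp.1 (j - 1) 0) else v2
        (nd.1 ++ [v1], nd.2 ++ [v2])) ([], [])) ([0], [0]))
    = (tbl W u.reverse 1, tbl W u.reverse 2) := by
  induction u using List.reverseRecOn with
  | nil => simp [tbl, gAux]
  | append_singleton t x ih =>
    rw [List.foldl_append, ih, List.foldl_cons, List.foldl_nil, List.reverse_append]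
    simpa using stepB_core W hW x t.reverse

theorem B_eq_gAux (schedule : List Int) (w : Int) :
    max_apple_alt schedule w = gAux schedule 1 w := by
  have hW : (0 : Int) ≤ (if w > 0 then w else 0) := by split <;> omega
  have hcast : (((if w > 0 then w else 0 : Int)).toNat : Int) = (if w > 0 then w else 0) :=
    Int.toNat_of_nonneg hW
  have h := foldB_inv (if w > 0 then w else 0) hW schedule.reverse
  show PySem.List.pyGetD (schedule.reverse.foldl _ ([0], [0])).1
      (min (if w > 0 then w else 0) (schedule.length : Int)) 0 = _
  rw [h, List.reverse_reverse]
  rw [getD_tbl _ _ _ _ (by push_cast; omega) (by push_cast; omega)]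
  apply gAux_congr
  by_cases h0 : w > 0 <;> simp only [h0, if_pos, ite_false] <;> omega

-- ===== VERDICT (by name: the statement is the Claim_ definition above) =====
theorem max_apple_spec : Claim_equal_max_apple := by
  intro schedule w _
  show max_apple schedule w = max_apple_alt schedule w
  rw [A_eq_gAux, B_eq_gAux]
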